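-- pv_equiv track=rewrite | github.com/MrQuadBit/Cheat-Sheets | fullstack_test.py | employeesPerCity
-- ===== SOURCE A (Python) =====
-- def employeesPerCity(employees):
--   cities = {}
--   for employee in employees:
--     if employee['city'] in cities:
--       cities[employee['city']] += 1
--     else:
--       cities[employee['city']] = 1
--   return cities
-- ===== SOURCE B (Python) =====
-- def employeesPerCity(employees):
--   order = []
--   for employee in employees:
--     c = employee['city']
--     if c not in order:
--       order.append(c)
--   return {c: sum(1 for e in employees if e['city'] == c) for c in order}
-- ===== Notes on version B (the rewrite author's own statement) =====
-- stated objective: alternative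
-- what changed: Replaces the dict count-accumulation single pass with a dedup pass collecting cities in first-occurrence order followed by a per-city counting comprehension.
import Mathlib
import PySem

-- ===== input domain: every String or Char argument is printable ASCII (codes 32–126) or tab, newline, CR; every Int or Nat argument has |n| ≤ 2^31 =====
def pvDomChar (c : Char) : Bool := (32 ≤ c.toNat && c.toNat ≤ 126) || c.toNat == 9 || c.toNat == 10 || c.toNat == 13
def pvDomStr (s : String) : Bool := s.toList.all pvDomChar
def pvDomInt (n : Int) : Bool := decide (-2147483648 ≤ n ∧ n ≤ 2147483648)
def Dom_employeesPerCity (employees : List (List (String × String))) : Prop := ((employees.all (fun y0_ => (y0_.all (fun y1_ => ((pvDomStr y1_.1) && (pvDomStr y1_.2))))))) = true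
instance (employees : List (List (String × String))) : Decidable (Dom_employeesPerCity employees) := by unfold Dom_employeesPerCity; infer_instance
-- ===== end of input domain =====

-- B replaces A's dict count-accumulation pass by a dedup pass over cities followed by a per-city counting comprehension (alternative decomposition, same results).


-- ===== PORT A =====
-- employee['city']: first-match lookup; total form is exact under Pre_ (the key is present)
def pvCity (e : List (String × String)) : String := (PySem.Dict.mk e).getD "city" ""

def employeesPerCity (employees : List (List (String × String))) : List (String × Int) :=
  (employees.foldl
    (fun cities employee =>
      let c := pvCity employee
      if cities.contains c then cities.insert c (cities.getD c 0 + 1)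
      else cities.insert c 1)
    PySem.Dict.empty).items

-- ===== PORT B =====
def employeesPerCity_alt (employees : List (List (String × String))) : List (String × Int) :=
  (employees.foldl (fun s employee => PySem.Set.add s (pvCity employee)) PySem.Set.empty).map
    (fun c => (c, ((employees.filter (fun e => pvCity e == c)).length : Int)))

-- ===== PRECONDITION & SPEC =====
-- Pre_ excludes exactly the employees missing the 'city' key, on which Python A raises KeyError.
def Pre_employeesPerCity (employees : List (List (String × String))) : Prop :=
  ∀ e ∈ employees, (PySem.Dict.mk e).contains "city" = true
instance (employees : List (List (String × String))) : Decidable (Pre_employeesPerCity employees) := by unfold Pre_employeesPerCity; infer_instance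
def pvWitness_employeesPerCity : (List (List (String × String))) :=
  [[("city", "Rome"), ("name", "a")], [("city", "Oslo")], [("city", "Rome")]]

def Spec_employeesPerCity (employees : List (List (String × String))) (out : List (String × Int)) : Prop := out = employeesPerCity_alt employees
instance (employees : List (List (String × String))) (out : List (String × Int)) : Decidable (Spec_employeesPerCity employees out) := by unfold Spec_employeesPerCity; infer_instance

-- ===== CLAIM (what is proved, stated in full; the proofs are below) =====
def Claim_equal_employeesPerCity : Prop := ∀ (employees : List (List (String × String))), Dom_employeesPerCity employees → Pre_employeesPerCity employees → Spec_employeesPerCity employees (employeesPerCity employees)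

-- ===== LEMMAS AND PROOFS =====

-- A's branch is the uniform counter step.
theorem pvA_step_eq (d : PySem.Dict String Int) (c : String) :
    (if d.contains c then d.insert c (d.getD c 0 + 1) else d.insert c 1)
      = d.insert c (d.getD c 0 + 1) := by
  by_cases h : d.contains c = true
  · simp [h]
  · rw [PySem.Dict.getD_of_not_contains (h := by simpa using h)]
    simp [h]

theorem pvA_eq (employees : List (List (String × String))) :
    employeesPerCity employees
      = (PySem.Set.ofList (employees.map pvCity)).map
          (fun k => (k, ((employees.map pvCity).count k : Int))) := by
  unfold employeesPerCity
  have h : (employees.foldl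
      (fun cities employee =>
        let c := pvCity employee
        if cities.contains c then cities.insert c (cities.getD c 0 + 1)
        else cities.insert c 1) PySem.Dict.empty)
      = PySem.Dict.counter (employees.map pvCity) := by
    rw [← PySem.Dict.foldl_insert_getD_add_one_eq_counter, List.foldl_map]
    apply PySem.List.foldl_congr_mem
    intro d e _
    exact pvA_step_eq d (pvCity e)
  rw [h, PySem.Dict.items_counter]

theorem pvB_count (employees : List (List (String × String))) (c : String) :
    ((employees.filter (fun e => pvCity e == c)).length : Int)
      = ((employees.map pvCity).count c : Int) := by
  rw [List.count_eq_length_filter, List.filter_map, List.length_map]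
  rfl

-- ===== VERDICT (by name: the statement is the Claim_ definition above) =====
theorem employeesPerCity_spec : Claim_equal_employeesPerCity := by
  intro employees _ _
  unfold Spec_employeesPerCity employeesPerCity_alt
  rw [pvA_eq, ← PySem.Set.update_map_eq_foldl_add, PySem.Set.update_empty]
  exact List.map_congr_left fun c _ => by rw [pvB_count]
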